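-- pv_equiv track=rewrite | github.com/Jaesang98/CodingTest | Programmers/Python3/LV0/06-10.py | solution
-- ===== SOURCE A (Python) =====
-- def solution(arr):
--     first = 0
--     second = 0
--
--     for i in range(len(arr)) :
--         if arr[i] == 2 :
--             first = i
--             break
--
--     for i in range(len(arr)-1,0,-1) :
--         if arr[i] == 2 :
--             second = i
--             break
--
--     if first == 0 and second == 0 :
--         return [-1]
--     else :
--         return arr[first : second+1]
-- ===== SOURCE B (Python) =====
-- def solution(arr):
--     idx = [i for i in range(len(arr)) if arr[i] == 2]
--     if not idx:
--         return [-1]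
--     return arr[idx[0]: idx[-1] + 1]
-- ===== Notes on version B (the rewrite author's own statement) =====
-- stated objective: simpler
-- what changed: Replaces A's two directional break-loops and sentinel test by one comprehension collecting all indices of 2, returning [-1] exactly when that list is empty and slicing between its first and last entry otherwise.
-- intended difference: On arrays whose only 2 is at index 0 (e.g. [2] or [2,1,1]) A's zero-sentinels collide and it returns [-1]; B returns [2], the subarray between the first and last occurrence of 2, which is the intended value. — e.g. on solution([2, 1, 1]): A returns [-1], B returns [2]
import Mathlib
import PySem

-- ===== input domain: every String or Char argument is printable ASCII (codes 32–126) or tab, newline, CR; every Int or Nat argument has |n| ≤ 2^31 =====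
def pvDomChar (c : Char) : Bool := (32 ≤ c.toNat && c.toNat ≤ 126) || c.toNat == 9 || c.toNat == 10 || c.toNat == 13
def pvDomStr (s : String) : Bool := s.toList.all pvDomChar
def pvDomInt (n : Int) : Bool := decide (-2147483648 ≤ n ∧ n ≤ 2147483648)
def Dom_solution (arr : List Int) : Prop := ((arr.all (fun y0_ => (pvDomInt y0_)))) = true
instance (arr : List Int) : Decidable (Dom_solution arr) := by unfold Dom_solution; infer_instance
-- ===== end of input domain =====

-- B replaces A's two directional break-loops and zero-sentinels by one comprehension of all
-- indices of 2 (objective: simpler); return value only, no mutation on either side.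

-- ===== PORT A =====
-- A's two `for … break` loops share one shape: scan a list of indices, return the first index
-- holding 2, else the initial value 0 (`first = 0` / `second = 0` before the loop).
def pvScanA (arr : List Int) (idxs : List Int) : Int :=
  match idxs with
  | [] => 0
  | i :: rest => if PySem.List.pyGet? arr i == some 2 then i else pvScanA arr rest

def solution (arr : List Int) : List Int :=
  let first := pvScanA arr (PySem.List.pyRange 0 (arr.length : Int) 1)
  let second := pvScanA arr (PySem.List.pyRange ((arr.length : Int) - 1) 0 (-1))
  if first = 0 ∧ second = 0 then [-1]
  else PySem.List.slice arr (some first) (some (second + 1))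

-- ===== PORT B =====
def solution_alt (arr : List Int) : List Int :=
  let idx := (PySem.List.pyRange 0 (arr.length : Int) 1).filter
      (fun i => PySem.List.pyGet? arr i == some 2)
  match idx with
  | [] => [-1]
  | i :: rest => PySem.List.slice arr (some i) (some ((i :: rest).getLastD 0 + 1))

-- ===== PRECONDITION & SPEC =====
-- On arrays whose only 2 is at index 0 (e.g. [2] or [2,1,1]) A's zero-sentinels collide and it
-- returns [-1]; B returns [2], the subarray between the first and last occurrence of 2, which is
-- the intended value.
def D_solution (arr : List Int) : Prop := arr ≠ [] ∧ arr.headD 0 = 2 ∧ ¬ (2 ∈ arr.tail)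
instance (arr : List Int) : Decidable (D_solution arr) := by unfold D_solution; infer_instance

def Spec_solution (arr : List Int) (out : List Int) : Prop := ¬ D_solution arr → out = solution_alt arr
instance (arr : List Int) (out : List Int) : Decidable (Spec_solution arr out) := by unfold Spec_solution; infer_instance

def pvDiffWitness_solution : List Int := [2, 1, 1]
def pvDiffWitnessOut_solution : (List Int) × (List Int) := ([-1], [2])

-- ===== CLAIM (what is proved, stated in full; the proofs are below) =====
def Claim_unchanged_solution : Prop := ∀ (arr : List Int), Dom_solution arr → Spec_solution arr (solution arr)
def Claim_changed_solution : Prop := Dom_solution (pvDiffWitness_solution) ∧ D_solution (pvDiffWitness_solution) ∧ solution (pvDiffWitness_solution) = pvDiffWitnessOut_solution.1 ∧ solution_alt (pvDiffWitness_solution) = pvDiffWitnessOut_solution.2 ∧ pvDiffWitnessOut_solution.1 ≠ pvDiffWitnessOut_solution.2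
def Claim_exact_solution : Prop := ∀ (arr : List Int), Dom_solution arr → D_solution arr → solution arr ≠ solution_alt arr

-- ===== LEMMAS AND PROOFS =====

-- A's break-loop returns the head of the filtered index list (default 0).
lemma pvScanA_eq_headD (arr : List Int) (l : List Int) :
    pvScanA arr l = (l.filter (fun i => PySem.List.pyGet? arr i == some 2)).headD 0 := by
  induction l with
  | nil => rfl
  | cons i rest ih =>
      by_cases h : PySem.List.pyGet? arr i == some 2
      · simp [pvScanA, h]
      · simp [pvScanA, h, ih]

-- tail indices: the filter over range(1, n) is empty iff 2 does not occur in the tail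
lemma filt_tail_nil_iff (a : Int) (t : List Int) :
    ((PySem.List.pyRange 1 (((a :: t).length : Int)) 1).filter
        (fun i => PySem.List.pyGet? (a :: t) i == some 2)) = [] ↔ ¬ (2 ∈ t) := by
  rw [List.filter_eq_nil_iff]
  constructor
  · intro h hmem
    obtain ⟨m, hm, hv⟩ := List.mem_iff_getElem.mp hmem
    refine h ((m : Int) + 1) ?_ ?_
    · rw [PySem.List.mem_pyRange_one]
      simp only [List.length_cons]
      push_cast
      omega
    · have hcast : ((m : Int) + 1) = ((m + 1 : Nat) : Int) := by push_cast; ring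
      rw [hcast, PySem.List.pyGet?_natCast]
      simp [List.getElem?_eq_getElem hm, hv]
  · intro h2 i hi
    rw [PySem.List.mem_pyRange_one] at hi
    have h1 : (1 : Int) ≤ i := hi.1
    have h2' : i < ((a :: t).length : Int) := hi.2
    have hi' : i = ((i.toNat : Int)) := by omega
    rw [hi', PySem.List.pyGet?_natCast]
    intro hcon
    simp only [beq_iff_eq] at hcon
    have hlt : i.toNat < (a :: t).length := by
      simp only [List.length_cons] at h2' ⊢; omega
    rw [List.getElem?_eq_getElem hlt] at hcon
    obtain ⟨m, hm⟩ : ∃ m, i.toNat = m + 1 := ⟨i.toNat - 1, by omega⟩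
    apply h2
    have hmt : m < t.length := by simp only [List.length_cons] at hlt; omega
    have hg : (a :: t)[i.toNat] = t[m]'hmt := by
      simp [hm]
    rw [hg] at hcon
    injection hcon with hv
    exact hv ▸ List.getElem_mem _

-- every index in the tail filter is ≥ 1
lemma filt_tail_pos (arr : List Int) (i : Int)
    (h : i ∈ (PySem.List.pyRange 1 ((arr.length : Int)) 1).filter
        (fun j => PySem.List.pyGet? arr j == some 2)) : 1 ≤ i := by
  have := (List.mem_filter.mp h).1
  rw [PySem.List.mem_pyRange_one] at this
  exact this.1

-- A's `second` loop, over range(len-1, 0, -1), yields the last entry of the tail filter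
lemma second_eq_getLastD (arr : List Int) :
    pvScanA arr (PySem.List.pyRange ((arr.length : Int) - 1) 0 (-1)) =
      ((PySem.List.pyRange 1 ((arr.length : Int)) 1).filter
        (fun i => PySem.List.pyGet? arr i == some 2)).getLastD 0 := by
  rw [PySem.List.pyRange_neg_one_eq_reverse]
  have h : (0 : Int) + 1 = 1 := by ring
  have h2 : ((arr.length : Int) - 1) + 1 = (arr.length : Int) := by ring
  rw [h, h2, pvScanA_eq_headD, List.filter_reverse]
  rcases hF : (PySem.List.pyRange 1 ((arr.length : Int)) 1).filter
      (fun i => PySem.List.pyGet? arr i == some 2) with _ | ⟨j, r⟩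
  · rfl
  · rw [List.headD_eq_head?, List.head?_reverse, List.getLastD_eq_getLast?]

-- the split of range(0, n) used by both ports on a nonempty array
lemma range_split (a : Int) (t : List Int) :
    PySem.List.pyRange 0 (((a :: t).length : Int)) 1 =
      0 :: PySem.List.pyRange 1 (((a :: t).length : Int)) 1 := by
  rw [PySem.List.pyRange_one_cons (by simp only [List.length_cons]; push_cast; omega)]
  norm_num

-- ===== VERDICT (by name: the statement is the Claim_ definition above) =====
theorem solution_spec : Claim_unchanged_solution := by
  intro arr _ hD
  show solution arr = solution_alt arr
  rcases arr with _ | ⟨a, t⟩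
  · rfl
  · rw [solution, solution_alt, second_eq_getLastD, pvScanA_eq_headD, range_split,
        List.filter_cons]
    by_cases hp : (PySem.List.pyGet? (a :: t) 0 == some 2) = true
    · have ha : a = 2 := by
        simpa [PySem.List.pyGet?_zero] using hp
      rcases hF : (PySem.List.pyRange 1 (((a :: t).length : Int)) 1).filter
          (fun i => PySem.List.pyGet? (a :: t) i == some 2) with _ | ⟨j, r⟩
      · exfalso
        exact hD ⟨by simp, by simp [ha], (filt_tail_nil_iff a t).mp hF⟩
      · have hj : 1 ≤ ((j :: r).getLastD 0) := by
          apply filt_tail_pos (a :: t)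
          rw [hF]
          exact List.mem_of_getLast? rfl
        rw [if_pos hp, if_neg (by intro hc; omega)]
        simp only [List.headD_cons, List.getLastD_cons]
    · rw [if_neg hp]
      rcases hF : (PySem.List.pyRange 1 (((a :: t).length : Int)) 1).filter
          (fun i => PySem.List.pyGet? (a :: t) i == some 2) with _ | ⟨j, r⟩
      · rw [if_pos ⟨rfl, rfl⟩]
      · have hj : 1 ≤ j := by
          apply filt_tail_pos (a :: t)
          rw [hF]
          exact List.mem_cons_self
        rw [if_neg (by intro hc; simp only [List.headD_cons] at hc; omega)]
        simp only [List.headD_cons]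

theorem solution_changed : Claim_changed_solution := by unfold Claim_changed_solution; decide

theorem solution_tight : Claim_exact_solution := by
  intro arr _ hD
  obtain ⟨hne, hh, h2t⟩ := hD
  rcases arr with _ | ⟨a, t⟩
  · exact absurd rfl hne
  · have ha : a = 2 := by simpa using hh
    have h2t' : ¬ (2 ∈ t) := by simpa using h2t
    have hF : (PySem.List.pyRange 1 (((a :: t).length : Int)) 1).filter
        (fun i => PySem.List.pyGet? (a :: t) i == some 2) = [] :=
      (filt_tail_nil_iff a t).mpr h2t'
    have hp : (PySem.List.pyGet? (a :: t) 0 == some 2) = true := by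
      simp [ha]
    rw [solution, solution_alt, second_eq_getLastD, pvScanA_eq_headD, range_split,
        List.filter_cons, if_pos hp, hF]
    rw [if_pos ⟨rfl, rfl⟩]
    show ([-1] : List Int) ≠
      PySem.List.slice (a :: t) (some 0) (some ((([0] : List Int).getLastD 0) + 1))
    have hsl : PySem.List.slice (a :: t) (some 0) (some ((([0] : List Int).getLastD 0) + 1)) = [a] := by
      rw [show ((([0] : List Int).getLastD 0) + 1) = ((1:Nat):Int) by simp]
      simp [PySem.List.slice_to]
    rw [hsl, ha]
    decide
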